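-- pv_equiv track=rewrite | github.com/jslagrew/dshield-parser | examples/url-command-clustering.py | has_hidden
-- ===== SOURCE A (Python) =====
-- def strip_protocol(string):
--     if "://" in string:
--         string = string.split("/")[3:]
--         string = ['/'.join(string)][0]
--     return string
--
-- def has_hidden(string):
--     string = string.strip("/")
--     string = strip_protocol(string)
--     split_string = string.split("/")
--     if len(split_string) > 0:
--         for each_item in split_string:
--             if len(each_item) > 0:
--                 if each_item[0] == ".":
--                     return 1
--     return 0
--
-- def split_string(string, splitchars):
--     string = string.strip("/")
--     string = strip_protocol(string)
--     return_string = []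
--     if isinstance(string, str):
--         string = [string]
--     for each_char in splitchars:
--         for each_string in string:
--             return_string += each_string.split(each_char)
--         string = return_string
--         return_string = []
--     return string
-- ===== SOURCE B (Python) =====
-- def strip_protocol(string):
--     if "://" in string:
--         string = string.split("/")[3:]
--         string = ['/'.join(string)][0]
--     return string
--
-- def has_hidden(string):
--     string = string.strip("/")
--     string = strip_protocol(string)
--     return 1 if string.startswith(".") or "/." in string else 0
-- ===== Notes on version B (the rewrite author's own statement) =====
-- stated objective: simpler
-- what changed: B drops the split('/')-and-scan-segments loop and decides the answer with two constant string tests on the same post-processed string: startswith('.') or '/.' in it.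
import Mathlib
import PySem

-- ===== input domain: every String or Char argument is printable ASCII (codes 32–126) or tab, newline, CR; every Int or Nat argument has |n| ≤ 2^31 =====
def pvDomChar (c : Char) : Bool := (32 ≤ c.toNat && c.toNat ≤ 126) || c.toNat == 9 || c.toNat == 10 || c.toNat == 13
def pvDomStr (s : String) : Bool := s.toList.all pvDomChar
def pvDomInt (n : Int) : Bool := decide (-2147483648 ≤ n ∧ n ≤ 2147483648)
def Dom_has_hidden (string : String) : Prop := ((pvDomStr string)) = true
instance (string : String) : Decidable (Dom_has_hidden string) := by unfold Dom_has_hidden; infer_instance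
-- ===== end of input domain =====

-- B replaces A's split-on-'/'-and-scan-segments loop by two constant string tests
-- (startswith "." / "/." in s) on the same post-processed string: simpler, no tokenization.

-- ===== PORT A =====
-- module helper strip_protocol (shared by A and B, as in the Python module)
def stripProtocol (s : String) : String :=
  if PySem.Str.isIn "://" s then
    String.ofList (PySem.Chars.join ['/']
      (PySem.List.slice (PySem.Chars.splitOn s.toList ['/']) (some 3) none))
  else s

-- the 'for each_item in split_string' loop with its early return
def hasHiddenLoop : List (List Char) → Int
  | [] => 0
  | seg :: t =>
    if seg.length > 0 then
      if PySem.List.pyGet? seg 0 = some '.' then 1 else hasHiddenLoop t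
    else hasHiddenLoop t

def has_hidden (string : String) : Int :=
  let s1 := PySem.Str.stripChars string "/"
  let s2 := stripProtocol s1
  let parts := PySem.Chars.splitOn s2.toList ['/']
  if parts.length > 0 then hasHiddenLoop parts else 0

-- ===== PORT B =====
def has_hidden_alt (string : String) : Int :=
  let s1 := PySem.Str.stripChars string "/"
  let s2 := stripProtocol s1
  if PySem.Str.startswith s2 "." || PySem.Str.isIn "/." s2 then 1 else 0

-- ===== PRECONDITION & SPEC =====
def Spec_has_hidden (string : String) (out : Int) : Prop := out = has_hidden_alt string
instance (string : String) (out : Int) : Decidable (Spec_has_hidden string out) := by unfold Spec_has_hidden; infer_instance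

-- ===== CLAIM (what is proved, stated in full; the proofs are below) =====
def Claim_equal_has_hidden : Prop := ∀ (string : String), Dom_has_hidden string → Spec_has_hidden string (has_hidden string)

-- ===== LEMMAS AND PROOFS =====

-- clean structural model of str.split('/') (cur = current segment so far)
def pvSplit (cur : List Char) : List Char → List (List Char)
  | [] => [cur]
  | c :: rest => if c = '/' then cur :: pvSplit [] rest else pvSplit (cur ++ [c]) rest

-- "some segment after a '/' starts with '.'", structurally
def pvHSD : List Char → Bool
  | [] => false
  | c :: t => (decide (c = '/') && decide (t.head? = some '.')) || pvHSD t

lemma pvSplit_ne_nil (l cur : List Char) : pvSplit cur l ≠ [] := by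
  induction l generalizing cur with
  | nil => simp [pvSplit]
  | cons c rest ih => simp only [pvSplit]; split <;> simp [ih]

lemma splitOn_go_eq (fuel : Nat) :
    ∀ (l cur : List Char) (acc : List (List Char)), l.length ≤ fuel →
      PySem.Chars.splitOn.go ['/'] fuel l cur acc = acc.reverse ++ pvSplit cur.reverse l := by
  induction fuel with
  | zero =>
    intro l cur acc h
    have hl : l = [] := by cases l <;> simp_all
    subst hl
    simp [PySem.Chars.splitOn.go, pvSplit]
  | succ n ih =>
    intro l cur acc h
    cases l with
    | nil => simp [PySem.Chars.splitOn.go, pvSplit]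
    | cons c rest =>
      by_cases hc : c = '/'
      · subst hc
        have hpre : List.isPrefixOf ['/'] ('/' :: rest) = true := by simp [List.isPrefixOf]
        simp only [PySem.Chars.splitOn.go, hpre, if_pos]
        rw [show List.drop ['/'].length ('/' :: rest) = rest from rfl]
        rw [ih rest [] ((cur.reverse) :: acc) (by simpa using Nat.le_of_succ_le_succ h)]
        simp [pvSplit]
      · have hpre : List.isPrefixOf ['/'] (c :: rest) = false := by
          simp only [List.isPrefixOf, Bool.and_eq_false_iff]
          left
          simp [Ne.symm hc]
        simp only [PySem.Chars.splitOn.go, hpre, Bool.false_eq_true, if_neg, not_false_iff]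
        rw [ih rest (c :: cur) acc (by simpa using Nat.le_of_succ_le_succ h)]
        simp [pvSplit, hc]

lemma splitOn_eq_pvSplit (l : List Char) :
    PySem.Chars.splitOn l ['/'] = pvSplit [] l := by
  unfold PySem.Chars.splitOn
  simpa using splitOn_go_eq (l.length + 1) l [] [] (by omega)

lemma hasHiddenLoop_cons (seg : List Char) (t : List (List Char)) :
    hasHiddenLoop (seg :: t) = if seg.head? = some '.' then 1 else hasHiddenLoop t := by
  cases seg with
  | nil => simp [hasHiddenLoop]
  | cons a s => simp [hasHiddenLoop, PySem.List.pyGet?, PySem.List.pyIdx?]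

lemma hasHiddenLoop_pvSplit (l cur : List Char) :
    hasHiddenLoop (pvSplit cur l) =
      if cur.head? = some '.' ∨ (cur = [] ∧ l.head? = some '.') ∨ pvHSD l = true then 1 else 0 := by
  induction l generalizing cur with
  | nil => simp [pvSplit, hasHiddenLoop_cons, hasHiddenLoop, pvHSD]
  | cons c rest ih =>
    by_cases hc : c = '/'
    · subst hc
      have hs : pvSplit cur ('/' :: rest) = cur :: pvSplit [] rest := by simp [pvSplit]
      rw [hs, hasHiddenLoop_cons, ih []]
      have hhsd : pvHSD ('/' :: rest) = ((rest.head? = some '.') || pvHSD rest) := by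
        simp [pvHSD]
      rw [hhsd]
      by_cases hcur : cur.head? = some '.'
      · simp [hcur]
      · by_cases hr : rest.head? = some '.' <;> simp [hr, hcur]
    · have hs : pvSplit cur (c :: rest) = pvSplit (cur ++ [c]) rest := by simp [pvSplit, hc]
      rw [hs, ih]
      have hh : (cur ++ [c]).head? = if cur = [] then some c else cur.head? := by
        cases cur <;> simp
      have hhsd : pvHSD (c :: rest) = pvHSD rest := by simp [pvHSD, hc]
      rw [hhsd, hh]
      by_cases hcur : cur = []
      · subst hcur
        by_cases hcd : c = '.'
        · subst hcd; simp
        · simp [hcd]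
      · simp [hcur]

lemma startswith_dot_iff (l : List Char) :
    PySem.Chars.startswith l ['.'] = true ↔ l.head? = some '.' := by
  cases l with
  | nil => simp [PySem.Chars.startswith, List.isPrefixOf]
  | cons a t =>
    simp only [PySem.Chars.startswith, List.isPrefixOf,
      Bool.and_true, beq_iff_eq, List.head?_cons, Option.some.injEq]
    exact eq_comm

lemma prefix_two_iff (l : List Char) :
    ['/', '.'] <+: l ↔ ∃ t, l = '/' :: '.' :: t := by
  constructor
  · rintro ⟨t, rfl⟩; exact ⟨t, rfl⟩
  · rintro ⟨t, rfl⟩; exact ⟨t, rfl⟩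

lemma pvHSD_iff (l : List Char) : pvHSD l = true ↔ ['/', '.'] <:+: l := by
  induction l with
  | nil => simp [pvHSD]
  | cons c t ih =>
    rw [List.infix_cons_iff, ← ih, prefix_two_iff]
    simp only [pvHSD, Bool.or_eq_true, Bool.and_eq_true, decide_eq_true_eq]
    constructor
    · rintro (⟨rfl, hh⟩ | h)
      · left
        cases t with
        | nil => simp at hh
        | cons a t' => simp at hh; exact ⟨t', by simp [hh]⟩
      · right; exact h
    · rintro (⟨t', he⟩ | h)
      · cases he; exact Or.inl ⟨rfl, rfl⟩
      · right; exact h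

lemma pvHSD_eq_isIn (l : List Char) : pvHSD l = PySem.Chars.isIn ['/', '.'] l := by
  by_cases h : ['/', '.'] <:+: l
  · rw [(pvHSD_iff l).mpr h, (PySem.Chars.isIn_iff_infix _ _).mpr h]
  · rw [Bool.eq_iff_iff]
    simp [pvHSD_iff, PySem.Chars.isIn_iff_infix, h]

lemma main_chars (cs : List Char) :
    hasHiddenLoop (PySem.Chars.splitOn cs ['/']) =
      if (PySem.Chars.startswith cs ['.'] || PySem.Chars.isIn ['/', '.'] cs) = true then 1 else 0 := by
  rw [splitOn_eq_pvSplit, hasHiddenLoop_pvSplit]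
  rw [← pvHSD_eq_isIn]
  by_cases h1 : cs.head? = some '.'
  · simp [h1, (startswith_dot_iff cs).mpr h1]
  · have h2 : PySem.Chars.startswith cs ['.'] = false := by
      rw [← Bool.not_eq_true, startswith_dot_iff]; exact h1
    by_cases h3 : pvHSD cs = true <;> simp [h1, h2, h3]

-- ===== VERDICT (by name: the statement is the Claim_ definition above) =====
theorem has_hidden_spec : Claim_equal_has_hidden := by
  intro string _
  unfold Spec_has_hidden has_hidden has_hidden_alt
  have hne := pvSplit_ne_nil (stripProtocol (PySem.Str.stripChars string "/")).toList []
  rw [← splitOn_eq_pvSplit] at hne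
  rw [if_pos (List.length_pos_of_ne_nil hne)]
  rw [main_chars]
  have h1 : PySem.Str.startswith (stripProtocol (PySem.Str.stripChars string "/")) "." =
      PySem.Chars.startswith (stripProtocol (PySem.Str.stripChars string "/")).toList ['.'] := by
    simp [PySem.Str.startswith]
  have h2 : PySem.Str.isIn "/." (stripProtocol (PySem.Str.stripChars string "/")) =
      PySem.Chars.isIn ['/', '.'] (stripProtocol (PySem.Str.stripChars string "/")).toList := by
    simp [PySem.Str.isIn]
  simp only [h1, h2]
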